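-- pv_equiv track=rewrite | github.com/huid857/wanzheng- | shoe_regime_detector.py | _label_sequence
-- ===== SOURCE A (Python) =====
-- def _label_sequence(seq: list) -> list:
--     """
--     逐位给序列元素打标签，返回与 seq 等长的标签列表。
--
--     标签类型：
--       'long_streak' — 处于真实长龙段（连续段长度 ≥3）
--       'single_alt'  — 处于严格单跳（BPBP）
--       'double_alt'  — 处于双对交替（BBPP）
--       'chaos'       — 不属于任何清晰模式
--     """
--     n = len(seq)
--     labels = ['chaos'] * n
--
--     if n < 3:
--         return labels
--
--     # 预计算每个位置的"连续段长度"（向左延伸）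
--     run_len = [1] * n
--     for i in range(1, n):
--         if seq[i] == seq[i - 1]:
--             run_len[i] = run_len[i - 1] + 1
--         else:
--             run_len[i] = 1
--
--     for i in range(2, n):
--         same_prev = (seq[i] == seq[i - 1])
--
--         if same_prev:
--             rl = run_len[i]
--             if rl >= 3:
--                 # 真实长龙：连续段长度 ≥3
--                 labels[i] = 'long_streak'
--
--             elif rl == 2:
--                 # 段长==2时，判断是真正对还是双跳对内
--                 pair_start = i - 1
--                 if pair_start >= 1:
--                     prev_pair_len = run_len[pair_start - 1]
--                     if prev_pair_len == 2:
--                         labels[i] = 'double_alt'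
--                     elif prev_pair_len == 1:
--                         labels[i] = 'chaos'
--                     else:
--                         labels[i] = 'long_streak'
--                 else:
--                     labels[i] = 'long_streak'
--             continue
--
--         else:  # diff_prev
--             # Audit#C修复：双跳判断需要更严格的条件
--             # 不仅前段长度==2，还要再往前也是长度2的不同值段（BBPP结构）
--             if i >= 3:
--                 if run_len[i - 1] == 2 and run_len[i] == 1:
--                     # 找到前段(长度2)的起始位置，再看更前一段
--                     prev_seg_start = i - 2  # 前段起始（长度2的段头）
--                     if prev_seg_start >= 2:
--                         # 更前一段的末尾在 prev_seg_start - 1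
--                         before_prev_len = run_len[prev_seg_start - 1]
--                         if before_prev_len == 2:
--                             # 确认是 XX YY Z 结构（真正双跳）
--                             labels[i] = 'double_alt'
--                             continue
--                     # 否则不是双跳：可能是长龙末尾的PP→B
--
--             if seq[i - 2] != seq[i - 1]:
--                 labels[i] = 'single_alt'
--                 continue
--
--     return labels
-- ===== SOURCE B (Python) =====
-- def _label_sequence(seq: list) -> list:
--     # One streaming pass: keep a sliding window of the last three run lengths
--     # (r1 = run length ending at i-1, r2 at i-2, r3 at i-3; 0 = position absent)
--     # and the previous value; no run_len array, no index arithmetic.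
--     labels = []
--     prev = None
--     r1 = r2 = r3 = 0
--     for i, x in enumerate(seq):
--         r = r1 + 1 if i > 0 and x == prev else 1
--         if i < 2:
--             lab = 'chaos'
--         elif x == prev:
--             if r >= 3:
--                 lab = 'long_streak'
--             elif r2 == 2:
--                 lab = 'double_alt'
--             elif r2 == 1:
--                 lab = 'chaos'
--             else:
--                 lab = 'long_streak'
--         else:
--             if r1 == 1:
--                 lab = 'single_alt'
--             elif r1 == 2 and r3 == 2:
--                 lab = 'double_alt'
--             else:
--                 lab = 'chaos'
--         labels.append(lab)
--         r3, r2, r1, prev = r2, r1, r, x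
--     return labels
-- ===== Notes on version B (the rewrite author's own statement) =====
-- stated objective: alternative
-- what changed: Replaces A's precomputed run_len array plus index-arithmetic second loop by a single streaming pass that carries a three-run-length sliding window (r1,r2,r3) and the previous value, appending each label as it goes.
import Mathlib
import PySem

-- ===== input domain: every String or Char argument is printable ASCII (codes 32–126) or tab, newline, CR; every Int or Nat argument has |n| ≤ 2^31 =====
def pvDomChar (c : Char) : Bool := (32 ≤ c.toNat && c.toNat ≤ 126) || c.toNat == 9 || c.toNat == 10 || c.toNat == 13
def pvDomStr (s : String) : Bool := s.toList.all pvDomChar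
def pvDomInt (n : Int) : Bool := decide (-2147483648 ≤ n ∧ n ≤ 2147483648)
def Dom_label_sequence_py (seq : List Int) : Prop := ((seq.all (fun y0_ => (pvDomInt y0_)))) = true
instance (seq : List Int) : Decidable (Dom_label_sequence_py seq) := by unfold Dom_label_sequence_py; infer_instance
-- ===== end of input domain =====

-- B replaces A's precomputed run_len array and index-juggling second loop by a single
-- streaming pass that carries a three-run-length sliding window (objective: simpler one-pass decomposition).

-- ===== PORT A =====
-- literal transliteration of _label_sequence: run_len array pass, then an index loop over range(2, n)
def label_sequence_py (seq : List Int) : List String :=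
  let n : Int := (seq.length : Int)
  let labels := List.replicate seq.length "chaos"
  if n < 3 then labels
  else
    let run_len : List Int :=
      (PySem.List.pyRange 1 n 1).foldl (fun rl i =>
        if PySem.List.pyGetD seq i 0 == PySem.List.pyGetD seq (i - 1) 0 then
          PySem.List.pySetD rl i (PySem.List.pyGetD rl (i - 1) 0 + 1)
        else
          PySem.List.pySetD rl i 1) (List.replicate seq.length (1 : Int))
    (PySem.List.pyRange 2 n 1).foldl (fun labels i =>
      let same_prev := PySem.List.pyGetD seq i 0 == PySem.List.pyGetD seq (i - 1) 0
      if same_prev then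
        let rl := PySem.List.pyGetD run_len i 0
        if 3 ≤ rl then PySem.List.pySetD labels i "long_streak"
        else if rl == 2 then
          let pair_start := i - 1
          if 1 ≤ pair_start then
            let prev_pair_len := PySem.List.pyGetD run_len (pair_start - 1) 0
            if prev_pair_len == 2 then PySem.List.pySetD labels i "double_alt"
            else if prev_pair_len == 1 then PySem.List.pySetD labels i "chaos"
            else PySem.List.pySetD labels i "long_streak"
          else PySem.List.pySetD labels i "long_streak"
        else labels
      else
        -- the nested 'if i >= 3: … continue' double-jump test, flattened with its fall-through
        let dbl :=
          if 3 ≤ i then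
            if PySem.List.pyGetD run_len (i - 1) 0 == 2 && PySem.List.pyGetD run_len i 0 == 1 then
              let prev_seg_start := i - 2
              if 2 ≤ prev_seg_start then
                PySem.List.pyGetD run_len (prev_seg_start - 1) 0 == 2
              else false
            else false
          else false
        if dbl then PySem.List.pySetD labels i "double_alt"
        else if !(PySem.List.pyGetD seq (i - 2) 0 == PySem.List.pyGetD seq (i - 1) 0) then
          PySem.List.pySetD labels i "single_alt"
        else labels) labels

-- ===== PORT B =====
-- transliteration of Source B: one enumerate fold carrying (labels, prev, r1, r2, r3)
def label_sequence_py_alt (seq : List Int) : List String :=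
  (((PySem.List.enumerate seq).foldl (fun st p =>
    let labels := st.1
    let prev := st.2.1
    let r1 := st.2.2.1
    let r2 := st.2.2.2.1
    let r3 := st.2.2.2.2
    let i := p.1
    let x := p.2
    let r : Int := if 0 < i && (some x == prev) then r1 + 1 else 1
    let lab : String :=
      if i < 2 then "chaos"
      else if some x == prev then
        if 3 ≤ r then "long_streak"
        else if r2 == 2 then "double_alt"
        else if r2 == 1 then "chaos"
        else "long_streak"
      else
        if r1 == 1 then "single_alt"
        else if r1 == 2 && r3 == 2 then "double_alt"
        else "chaos"
    (labels ++ [lab], some x, r, r1, r2))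
    (([] : List String), (none : Option Int), (0 : Int), (0 : Int), (0 : Int))) : List String × Option Int × Int × Int × Int).1

-- ===== PRECONDITION & SPEC =====
def Spec_label_sequence_py (seq : List Int) (out : List String) : Prop := out = label_sequence_py_alt seq
instance (seq : List Int) (out : List String) : Decidable (Spec_label_sequence_py seq out) := by unfold Spec_label_sequence_py; infer_instance

-- ===== CLAIM (what is proved, stated in full; the proofs are below) =====
def Claim_equal_label_sequence_py : Prop := ∀ (seq : List Int), Dom_label_sequence_py seq → Spec_label_sequence_py seq (label_sequence_py seq)

-- ===== LEMMAS AND PROOFS =====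

-- run length ending at position i, extending left (= A's run_len[i])
def rlF (seq : List Int) : Nat → Int
  | 0 => 1
  | k + 1 => if seq.getD (k + 1) 0 = seq.getD k 0 then rlF seq k + 1 else 1

-- window value: run length ending j positions before i (0 if that position does not exist)
def wF (seq : List Int) (i j : Nat) : Int := if j ≤ i then rlF seq (i - j) else 0

-- the label both programs give position i
def specLab (seq : List Int) (i : Nat) : String :=
  if i < 2 then "chaos"
  else if seq.getD i 0 = seq.getD (i - 1) 0 then
    if 3 ≤ rlF seq i then "long_streak"
    else if wF seq i 2 = 2 then "double_alt"
    else if wF seq i 2 = 1 then "chaos"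
    else "long_streak"
  else
    if wF seq i 1 = 1 then "single_alt"
    else if wF seq i 1 = 2 ∧ wF seq i 3 = 2 then "double_alt"
    else "chaos"

theorem one_le_rlF (seq : List Int) (k : Nat) : 1 ≤ rlF seq k := by
  cases k with
  | zero => simp [rlF]
  | succ m =>
    rw [rlF]
    split
    · have := one_le_rlF seq m; omega
    · omega

theorem set_map_range {α : Type} (n k : Nat) (g : Nat → α) (v : α) :
    ((List.range n).map g).set k v
      = (List.range n).map (fun j => if j = k then v else g j) := by
  apply List.ext_getElem
  · simp
  · intro j h1 h2
    simp only [List.getElem_set, List.getElem_map, List.getElem_range]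
    rcases eq_or_ne k j with h | h
    · subst h; simp
    · rw [if_neg h, if_neg (Ne.symm h)]

-- A's first loop builds exactly the rlF values
theorem runlen_loop (seq : List Int) (k : Nat) (hk : k ≤ seq.length) :
    (PySem.List.pyRange 1 (k : Int) 1).foldl (fun rl i =>
        if PySem.List.pyGetD seq i 0 == PySem.List.pyGetD seq (i - 1) 0 then
          PySem.List.pySetD rl i (PySem.List.pyGetD rl (i - 1) 0 + 1)
        else
          PySem.List.pySetD rl i 1) (List.replicate seq.length (1 : Int))
      = (List.range seq.length).map (fun j => if j < k then rlF seq j else 1) := by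
  induction k with
  | zero =>
    rw [PySem.List.pyRange_one_eq_nil (by omega), List.foldl_nil]
    apply List.ext_getElem (by simp)
    intro j h1 h2
    simp only [List.getElem_replicate, List.getElem_map, List.getElem_range]
    rw [if_neg (by omega)]
  | succ m ih =>
    rcases Nat.eq_zero_or_pos m with hm | hm
    · subst hm
      rw [PySem.List.pyRange_one_eq_nil (by omega), List.foldl_nil]
      apply List.ext_getElem (by simp)
      intro j h1 h2
      simp only [List.getElem_replicate, List.getElem_map, List.getElem_range]
      split
      · next h => have hj : j = 0 := by omega
                  subst hj; simp [rlF]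
      · rfl
    · have hcast : ((m + 1 : Nat) : Int) = (m : Int) + 1 := by push_cast; ring
      rw [hcast, PySem.List.pyRange_one_succ_right (by omega), List.foldl_append,
        ih (by omega), List.foldl_cons, List.foldl_nil]
      have hm1 : ((m : Int) - 1) = ((m - 1 : Nat) : Int) := by omega
      have hmm : m - 1 < m := by omega
      have hread : PySem.List.pyGetD ((List.range seq.length).map (fun j => if j < m then rlF seq j else 1)) ((m : Int) - 1) 0 = rlF seq (m - 1) := by
        rw [hm1, PySem.List.pyGetD_natCast, PySem.List.getD_map_range _ _ _ _ (by omega)]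
        simp [hmm]
      have hfin : ∀ v, v = rlF seq m →
          ((List.range seq.length).map (fun j => if j < m then rlF seq j else 1)).set m v
            = (List.range seq.length).map (fun j => if j < m + 1 then rlF seq j else 1) := by
        intro v hv
        rw [set_map_range]
        apply List.map_congr_left
        intro j hj
        rcases eq_or_ne j m with h | h
        · subst h; rw [if_pos rfl, if_pos (by omega)]; exact hv
        · rw [if_neg h]
          split
          · next hjm => rw [if_pos (by omega)]
          · next hjm => rw [if_neg (by omega)]
      by_cases hc : seq.getD m 0 = seq.getD (m - 1) 0
      · rw [if_pos (by simp only [PySem.List.pyGetD_natCast, hm1]; exact beq_iff_eq.mpr hc)]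
        rw [hread, PySem.List.pySetD_natCast]
        apply hfin
        rcases m with _ | m'
        · omega
        · rw [rlF]; simp only [Nat.add_sub_cancel] at hc ⊢; rw [if_pos hc]
      · rw [if_neg (by simp only [PySem.List.pyGetD_natCast, hm1, beq_iff_eq]; simpa [List.getD_eq_getElem?_getD] using hc)]
        rw [PySem.List.pySetD_natCast]
        apply hfin
        rcases m with _ | m'
        · omega
        · rw [rlF]; simp only [Nat.add_sub_cancel] at hc ⊢; rw [if_neg hc]

theorem rlF_of_eq (seq : List Int) (m : Nat) (hm : 1 ≤ m)
    (h : seq.getD m 0 = seq.getD (m - 1) 0) : rlF seq m = rlF seq (m - 1) + 1 := by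
  rcases m with _ | m'
  · omega
  · rw [rlF]; simp only [Nat.add_sub_cancel] at h ⊢; rw [if_pos h]

theorem rlF_of_ne (seq : List Int) (m : Nat) (hm : 1 ≤ m)
    (h : ¬ seq.getD m 0 = seq.getD (m - 1) 0) : rlF seq m = 1 := by
  rcases m with _ | m'
  · omega
  · rw [rlF]; simp only [Nat.add_sub_cancel] at h ⊢; rw [if_neg h]

theorem rlF_eq_one_iff (seq : List Int) (m : Nat) (hm : 1 ≤ m) :
    rlF seq m = 1 ↔ ¬ seq.getD m 0 = seq.getD (m - 1) 0 := by
  constructor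
  · intro h1 heq
    have := rlF_of_eq seq m hm heq
    have := one_le_rlF seq (m - 1)
    omega
  · exact rlF_of_ne seq m hm

-- A's second loop writes specLab at every position 2 ≤ j < k
theorem labels_loop (seq : List Int) (k : Nat) (hk : k ≤ seq.length) :
    (PySem.List.pyRange 2 (k : Int) 1).foldl (fun labels i =>
      let same_prev := PySem.List.pyGetD seq i 0 == PySem.List.pyGetD seq (i - 1) 0
      if same_prev then
        let rl := PySem.List.pyGetD ((List.range seq.length).map (fun j => rlF seq j)) i 0
        if 3 ≤ rl then PySem.List.pySetD labels i "long_streak"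
        else if rl == 2 then
          let pair_start := i - 1
          if 1 ≤ pair_start then
            let prev_pair_len := PySem.List.pyGetD ((List.range seq.length).map (fun j => rlF seq j)) (pair_start - 1) 0
            if prev_pair_len == 2 then PySem.List.pySetD labels i "double_alt"
            else if prev_pair_len == 1 then PySem.List.pySetD labels i "chaos"
            else PySem.List.pySetD labels i "long_streak"
          else PySem.List.pySetD labels i "long_streak"
        else labels
      else
        let dbl :=
          if 3 ≤ i then
            if PySem.List.pyGetD ((List.range seq.length).map (fun j => rlF seq j)) (i - 1) 0 == 2 && PySem.List.pyGetD ((List.range seq.length).map (fun j => rlF seq j)) i 0 == 1 then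
              let prev_seg_start := i - 2
              if 2 ≤ prev_seg_start then
                PySem.List.pyGetD ((List.range seq.length).map (fun j => rlF seq j)) (prev_seg_start - 1) 0 == 2
              else false
            else false
          else false
        if dbl then PySem.List.pySetD labels i "double_alt"
        else if !(PySem.List.pyGetD seq (i - 2) 0 == PySem.List.pyGetD seq (i - 1) 0) then
          PySem.List.pySetD labels i "single_alt"
        else labels) (List.replicate seq.length "chaos")
      = (List.range seq.length).map (fun j => if 2 ≤ j ∧ j < k then specLab seq j else "chaos") := by
  induction k with
  | zero =>
    rw [PySem.List.pyRange_one_eq_nil (by omega), List.foldl_nil]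
    apply List.ext_getElem (by simp)
    intro j h1 h2
    simp only [List.getElem_replicate, List.getElem_map, List.getElem_range]
    rw [if_neg (by omega)]
  | succ m ih =>
    rcases Nat.lt_or_ge m 2 with hm | hm
    · rw [PySem.List.pyRange_one_eq_nil (by omega), List.foldl_nil]
      apply List.ext_getElem (by simp)
      intro j h1 h2
      simp only [List.getElem_replicate, List.getElem_map, List.getElem_range]
      rw [if_neg (by omega)]
    · have hcast : ((m + 1 : Nat) : Int) = (m : Int) + 1 := by push_cast; ring
      rw [hcast, PySem.List.pyRange_one_succ_right (by omega), List.foldl_append,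
        ih (by omega), List.foldl_cons, List.foldl_nil]
      have hmn : m < seq.length := by omega
      have hA : ((m : Int) - 1) = ((m - 1 : Nat) : Int) := by omega
      have hB : ((m : Int) - 2) = ((m - 2 : Nat) : Int) := by omega
      have hv0 : PySem.List.pyGetD ((List.range seq.length).map (fun j => rlF seq j)) (m : Int) 0 = rlF seq m := by
        rw [PySem.List.pyGetD_natCast, PySem.List.getD_map_range _ _ _ _ hmn]
      have hv1 : PySem.List.pyGetD ((List.range seq.length).map (fun j => rlF seq j)) ((m : Int) - 1) 0 = rlF seq (m - 1) := by
        rw [hA, PySem.List.pyGetD_natCast, PySem.List.getD_map_range _ _ _ _ (by omega)]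
      have hv2 : PySem.List.pyGetD ((List.range seq.length).map (fun j => rlF seq j)) ((m : Int) - 1 - 1) 0 = rlF seq (m - 2) := by
        rw [show ((m : Int) - 1 - 1) = ((m - 2 : Nat) : Int) from by omega,
          PySem.List.pyGetD_natCast, PySem.List.getD_map_range _ _ _ _ (by omega)]
      have hs0 : PySem.List.pyGetD seq (m : Int) 0 = seq.getD m 0 := PySem.List.pyGetD_natCast seq m 0
      have hs1 : PySem.List.pyGetD seq ((m : Int) - 1) 0 = seq.getD (m - 1) 0 := by
        rw [hA, PySem.List.pyGetD_natCast]
      have hs2 : PySem.List.pyGetD seq ((m : Int) - 2) 0 = seq.getD (m - 2) 0 := by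
        rw [hB, PySem.List.pyGetD_natCast]
      have hfin : ∀ v, v = specLab seq m →
          ((List.range seq.length).map (fun j => if 2 ≤ j ∧ j < m then specLab seq j else "chaos")).set m v
            = (List.range seq.length).map (fun j => if 2 ≤ j ∧ j < m + 1 then specLab seq j else "chaos") := by
        intro v hv
        rw [set_map_range]
        apply List.map_congr_left
        intro j hj
        rcases eq_or_ne j m with h | h
        · subst h; rw [if_pos rfl, if_pos (by omega)]; exact hv
        · rw [if_neg h]
          by_cases hjm : 2 ≤ j ∧ j < m
          · rw [if_pos hjm, if_pos (by omega)]
          · rw [if_neg hjm, if_neg (by omega)]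
      have hkeep : specLab seq m = "chaos" →
          ((List.range seq.length).map (fun j => if 2 ≤ j ∧ j < m then specLab seq j else "chaos"))
            = (List.range seq.length).map (fun j => if 2 ≤ j ∧ j < m + 1 then specLab seq j else "chaos") := by
        intro hv
        apply List.map_congr_left
        intro j hj
        by_cases hjm : 2 ≤ j ∧ j < m
        · rw [if_pos hjm, if_pos (by omega)]
        · rw [if_neg hjm]
          by_cases hjm1 : 2 ≤ j ∧ j < m + 1
          · rw [if_pos hjm1, show j = m from by omega, hv]
          · rw [if_neg hjm1]
      by_cases hsame : seq.getD m 0 = seq.getD (m - 1) 0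
      · -- same_prev branch
        have hsb : (PySem.List.pyGetD seq (m : Int) 0 == PySem.List.pyGetD seq ((m : Int) - 1) 0) = true := by
          rw [hs0, hs1, beq_iff_eq]; exact hsame
        have hrlm : rlF seq m = rlF seq (m - 1) + 1 := rlF_of_eq seq m (by omega) hsame
        have hrl1 : 1 ≤ rlF seq (m - 1) := one_le_rlF seq (m - 1)
        simp only [hsb, if_true, hv0, hv1, hv2]
        by_cases h3 : (3 : Int) ≤ rlF seq m
        · rw [if_pos h3, PySem.List.pySetD_natCast]
          apply hfin
          rw [specLab, if_neg (by omega), if_pos hsame, if_pos h3]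
        · rw [if_neg h3]
          have h2' : rlF seq m = 2 := by omega
          rw [if_pos (by rw [beq_iff_eq]; exact h2'), if_pos (by omega : (1:Int) ≤ (m : Int) - 1)]
          have hw2 : wF seq m 2 = rlF seq (m - 2) := by rw [wF, if_pos (by omega)]
          by_cases hp2 : rlF seq (m - 2) = 2
          · rw [if_pos (by rw [beq_iff_eq]; exact hp2), PySem.List.pySetD_natCast]
            apply hfin
            rw [specLab, if_neg (by omega), if_pos hsame, if_neg h3, if_pos (by rw [hw2]; exact hp2)]
          · rw [if_neg (by rw [beq_iff_eq]; exact hp2)]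
            by_cases hp1 : rlF seq (m - 2) = 1
            · rw [if_pos (by rw [beq_iff_eq]; exact hp1), PySem.List.pySetD_natCast]
              apply hfin
              rw [specLab, if_neg (by omega), if_pos hsame, if_neg h3,
                if_neg (by rw [hw2]; exact hp2), if_pos (by rw [hw2]; exact hp1)]
            · rw [if_neg (by rw [beq_iff_eq]; exact hp1), PySem.List.pySetD_natCast]
              apply hfin
              rw [specLab, if_neg (by omega), if_pos hsame, if_neg h3,
                if_neg (by rw [hw2]; exact hp2), if_neg (by rw [hw2]; exact hp1)]
      · -- diff branch
        have hsb : (PySem.List.pyGetD seq (m : Int) 0 == PySem.List.pyGetD seq ((m : Int) - 1) 0) = false := by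
          rw [hs0, hs1]; exact beq_eq_false_iff_ne.mpr hsame
        have hrlm : rlF seq m = 1 := rlF_of_ne seq m (by omega) hsame
        have hw1 : wF seq m 1 = rlF seq (m - 1) := by rw [wF, if_pos (by omega)]
        simp only [hsb, Bool.false_eq_true, if_false, hv0, hv1, hv2]
        by_cases hone : rlF seq (m - 1) = 1
        · -- previous run has length 1: single_alt
          have hneq : ¬ seq.getD (m - 1) 0 = seq.getD (m - 1 - 1) 0 :=
            (rlF_eq_one_iff seq (m - 1) (by omega)).mp hone
          have hb1 : (rlF seq (m - 1) == 2) = false := by rw [hone]; decide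
          have hdbl : (if (3 : Int) ≤ (m : Int) then
              if (rlF seq (m - 1) == 2 && (rlF seq m == 1)) = true then
                if (2 : Int) ≤ (m : Int) - 2 then
                  PySem.List.pyGetD ((List.range seq.length).map (fun j => rlF seq j)) ((m : Int) - 2 - 1) 0 == 2
                else false
              else false
            else false) = false := by
            split
            · rw [if_neg (by rw [hb1]; simp)]
            · rfl
          rw [hdbl, if_neg (by decide : ¬ false = true)]
          have hs21 : (PySem.List.pyGetD seq ((m : Int) - 2) 0 == PySem.List.pyGetD seq ((m : Int) - 1) 0) = false := by
            rw [hs1, hs2, beq_eq_false_iff_ne]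
            intro h; exact hneq (by rw [show m - 1 - 1 = m - 2 from by omega]; exact h.symm)
          rw [hs21]
          rw [if_pos (by decide : (!false) = true), PySem.List.pySetD_natCast]
          apply hfin
          rw [specLab, if_neg (by omega), if_neg hsame, if_pos (by rw [hw1]; exact hone)]
        · -- previous run has length ≥ 2, so seq[m-2] == seq[m-1]
          have heq2 : seq.getD (m - 1) 0 = seq.getD (m - 1 - 1) 0 := by
            by_contra h
            exact hone ((rlF_eq_one_iff seq (m - 1) (by omega)).mpr h)
          have hs21 : (PySem.List.pyGetD seq ((m : Int) - 2) 0 == PySem.List.pyGetD seq ((m : Int) - 1) 0) = true := by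
            rw [hs1, hs2, beq_iff_eq, show m - 2 = m - 1 - 1 from by omega]
            exact heq2.symm
          have hw3 : wF seq m 3 = if 3 ≤ m then rlF seq (m - 3) else 0 := by rw [wF]
          by_cases hdc : rlF seq (m - 1) = 2 ∧ wF seq m 3 = 2
          · -- true double-alt structure
            have h4 : 4 ≤ m := by
              rcases Nat.lt_or_ge m 4 with h | h
              · exfalso
                rcases hdc with ⟨_, hw⟩
                rw [hw3] at hw
                by_cases h3' : 3 ≤ m
                · have hm3 : m = 3 := by omega
                  rw [if_pos h3'] at hw
                  rw [hm3] at hw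
                  simp [rlF] at hw
                · rw [if_neg h3'] at hw
                  exact absurd hw (by decide)
              · exact h
            have hv3 : PySem.List.pyGetD ((List.range seq.length).map (fun j => rlF seq j)) ((m : Int) - 2 - 1) 0 = rlF seq (m - 3) := by
              rw [show ((m : Int) - 2 - 1) = ((m - 3 : Nat) : Int) from by omega,
                PySem.List.pyGetD_natCast, PySem.List.getD_map_range _ _ _ _ (by omega)]
            have hw3v : rlF seq (m - 3) = 2 := by
              have := hdc.2
              rw [hw3, if_pos (by omega)] at this
              exact this
            have hdbl : (if (3 : Int) ≤ (m : Int) then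
                if (rlF seq (m - 1) == 2 && (rlF seq m == 1)) = true then
                  if (2 : Int) ≤ (m : Int) - 2 then
                    PySem.List.pyGetD ((List.range seq.length).map (fun j => rlF seq j)) ((m : Int) - 2 - 1) 0 == 2
                  else false
                else false
              else false) = true := by
              rw [if_pos (by omega : (3 : Int) ≤ (m : Int)),
                if_pos (by rw [hdc.1, hrlm]; decide),
                if_pos (by omega : (2 : Int) ≤ (m : Int) - 2), hv3, hw3v]
              decide
            rw [hdbl, if_pos rfl, PySem.List.pySetD_natCast]
            apply hfin
            rw [specLab, if_neg (by omega), if_neg hsame, if_neg (by rw [hw1, hdc.1]; decide),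
              if_pos (by rw [hw1]; exact hdc)]
          · -- chaos: nothing is written
            have hdbl : (if (3 : Int) ≤ (m : Int) then
                if (rlF seq (m - 1) == 2 && (rlF seq m == 1)) = true then
                  if (2 : Int) ≤ (m : Int) - 2 then
                    PySem.List.pyGetD ((List.range seq.length).map (fun j => rlF seq j)) ((m : Int) - 2 - 1) 0 == 2
                  else false
                else false
              else false) = false := by
              split
              · next h3i =>
                have h3n : 3 ≤ m := by omega
                by_cases hr2 : rlF seq (m - 1) = 2
                · rw [if_pos (by rw [hr2, hrlm]; decide)]
                  by_cases h4i : (2 : Int) ≤ (m : Int) - 2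
                  · rw [if_pos h4i]
                    have hv3 : PySem.List.pyGetD ((List.range seq.length).map (fun j => rlF seq j)) ((m : Int) - 2 - 1) 0 = rlF seq (m - 3) := by
                      rw [show ((m : Int) - 2 - 1) = ((m - 3 : Nat) : Int) from by omega,
                        PySem.List.pyGetD_natCast, PySem.List.getD_map_range _ _ _ _ (by omega)]
                    rw [hv3, beq_eq_false_iff_ne]
                    intro hc
                    exact hdc ⟨hr2, by rw [hw3, if_pos h3n]; exact hc⟩
                  · rw [if_neg h4i]
                · rw [if_neg (by rw [Bool.and_eq_true]; intro h; exact hr2 (beq_iff_eq.mp h.1))]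
              · rfl
            rw [hdbl, if_neg (by decide : ¬ false = true), hs21,
              if_neg (by decide : ¬ (!true) = true)]
            apply hkeep
            rw [specLab, if_neg (by omega), if_neg hsame, if_neg (by rw [hw1]; exact hone),
              if_neg (by rw [hw1]; exact hdc)]


theorem A_eq_spec (seq : List Int) :
    label_sequence_py seq = (List.range seq.length).map (specLab seq) := by
  have hmap2 : (List.range seq.length).map (fun j => if 2 ≤ j ∧ j < seq.length then specLab seq j else "chaos")
      = (List.range seq.length).map (specLab seq) := by
    apply List.map_congr_left; intro j hj
    simp only [List.mem_range] at hj
    by_cases h : 2 ≤ j ∧ j < seq.length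
    · rw [if_pos h]
    · rw [if_neg h, specLab, if_pos (by omega)]
  have hmap1 : (List.range seq.length).map (fun j => if j < seq.length then rlF seq j else 1)
      = (List.range seq.length).map (fun j => rlF seq j) := by
    apply List.map_congr_left; intro j hj
    rw [if_pos (by simpa using hj)]
  simp only [label_sequence_py]
  by_cases h3 : (seq.length : Int) < 3
  · rw [if_pos h3]
    apply List.ext_getElem (by simp)
    intro j h1 h2
    simp only [List.getElem_replicate, List.getElem_map, List.getElem_range]
    simp only [List.length_replicate] at h1
    rw [specLab, if_pos (by omega)]
  · rw [if_neg h3, runlen_loop seq seq.length (le_refl _), hmap1]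
    exact (labels_loop seq seq.length (le_refl _)).trans hmap2


-- proof-side copy of B's fold body (definitionally the lambda in label_sequence_py_alt)
def bodyB (st : List String × Option Int × Int × Int × Int) (p : Int × Int) :
    List String × Option Int × Int × Int × Int :=
  let labels := st.1
  let prev := st.2.1
  let r1 := st.2.2.1
  let r2 := st.2.2.2.1
  let r3 := st.2.2.2.2
  let i := p.1
  let x := p.2
  let r : Int := if 0 < i && (some x == prev) then r1 + 1 else 1
  let lab : String :=
    if i < 2 then "chaos"
    else if some x == prev then
      if 3 ≤ r then "long_streak"
      else if r2 == 2 then "double_alt"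
      else if r2 == 1 then "chaos"
      else "long_streak"
    else
      if r1 == 1 then "single_alt"
      else if r1 == 2 && r3 == 2 then "double_alt"
      else "chaos"
  (labels ++ [lab], some x, r, r1, r2)

-- invariant state after processing the first k elements
def stB (seq : List Int) (k : Nat) : List String × Option Int × Int × Int × Int :=
  ((List.range k).map (specLab seq),
   (if k = 0 then (none : Option Int) else some (seq.getD (k - 1) 0)),
   wF seq k 1, wF seq k 2, wF seq k 3)

theorem wF_shift (seq : List Int) (k j : Nat) : wF seq (k + 1) (j + 1) = wF seq k j := by
  rw [wF, wF]
  by_cases h : j ≤ k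
  · rw [if_pos (by omega), if_pos h, show k + 1 - (j + 1) = k - j from by omega]
  · rw [if_neg (by omega), if_neg h]

theorem wF_succ_one (seq : List Int) (k : Nat) : wF seq (k + 1) 1 = rlF seq k := by
  rw [wF, if_pos (by omega), Nat.add_sub_cancel]

theorem stepB (seq : List Int) (k : Nat) :
    bodyB (stB seq k) ((k : Int), seq.getD k 0) = stB seq (k + 1) := by
  have hr : (if 0 < (k : Int) && (some (seq.getD k 0) == (if k = 0 then (none : Option Int) else some (seq.getD (k - 1) 0))) then wF seq k 1 + 1 else 1) = rlF seq k := by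
    rcases Nat.eq_zero_or_pos k with hk0 | hk0
    · subst hk0
      rw [if_neg (by simp)]
      rfl
    · rw [if_neg (by omega : ¬ k = 0)]
      by_cases heq : seq.getD k 0 = seq.getD (k - 1) 0
      · rw [if_pos (by simp only [Bool.and_eq_true, decide_eq_true_eq, beq_iff_eq,
            Option.some.injEq]; exact ⟨by exact_mod_cast hk0, heq⟩)]
        rw [wF, if_pos (by omega), rlF_of_eq seq k (by omega) heq]
      · rw [if_neg (by simp only [Bool.and_eq_true, decide_eq_true_eq, beq_iff_eq,
            Option.some.injEq]; exact fun h => heq h.2)]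
        rw [rlF_of_ne seq k (by omega) heq]
  simp only [bodyB, stB, Prod.mk.injEq]
  refine ⟨?_, ⟨?_, ?_, ?_, ?_⟩⟩
  · -- labels component
    rw [List.range_succ, List.map_append, List.map_cons, List.map_nil]
    congr 1
    -- lab = specLab seq k
    rcases Nat.lt_or_ge k 2 with hk2 | hk2
    · rw [if_pos (by exact_mod_cast hk2), specLab, if_pos hk2]
    · rw [if_neg (by omega : ¬ (k : Int) < 2), hr, specLab, if_neg (by omega : ¬ k < 2),
        if_neg (by omega : ¬ k = 0)]
      by_cases heq : seq.getD k 0 = seq.getD (k - 1) 0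
      · rw [if_pos (by rw [beq_iff_eq, Option.some_inj]; exact heq), if_pos heq]
        by_cases h3 : (3 : Int) ≤ rlF seq k
        · rw [if_pos h3, if_pos h3]
        · rw [if_neg h3, if_neg h3]
          by_cases h22 : wF seq k 2 = 2
          · rw [if_pos (by rw [beq_iff_eq]; exact h22), if_pos h22]
          · rw [if_neg (by rw [beq_iff_eq]; exact h22), if_neg h22]
            by_cases h21 : wF seq k 2 = 1
            · rw [if_pos (by rw [beq_iff_eq]; exact h21), if_pos h21]
            · rw [if_neg (by rw [beq_iff_eq]; exact h21), if_neg h21]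
      · rw [if_neg (by rw [beq_iff_eq, Option.some_inj]; exact heq), if_neg heq]
        by_cases h11 : wF seq k 1 = 1
        · rw [if_pos (by rw [beq_iff_eq]; exact h11), if_pos h11]
        · rw [if_neg (by rw [beq_iff_eq]; exact h11), if_neg h11]
          by_cases h12 : wF seq k 1 = 2 ∧ wF seq k 3 = 2
          · rw [if_pos (by simp only [Bool.and_eq_true, beq_iff_eq]; exact h12), if_pos h12]
          · rw [if_neg (by simp only [Bool.and_eq_true, beq_iff_eq]; exact h12), if_neg h12]
  · rw [if_neg (by omega : ¬ k + 1 = 0), Nat.add_sub_cancel]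
  · rw [hr, wF_succ_one]
  · rw [show (2 : Nat) = 1 + 1 from rfl, wF_shift]
  · rw [show (3 : Nat) = 2 + 1 from rfl, wF_shift]

theorem B_fold (seq : List Int) : ∀ (suf : List Int) (k : Nat), k ≤ seq.length → suf = seq.drop k →
    (PySem.List.enumerate suf (k : Int)).foldl bodyB (stB seq k) = stB seq seq.length := by
  intro suf
  induction suf with
  | nil =>
    intro k hk hs
    have hkn : k = seq.length := by
      have := List.drop_eq_nil_iff.mp hs.symm
      omega
    rw [PySem.List.enumerate_nil, List.foldl_nil, hkn]
  | cons x rest ih =>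
    intro k hk hs
    have hlt : k < seq.length := by
      by_contra h
      rw [List.drop_eq_nil_of_le (by omega)] at hs
      exact List.cons_ne_nil x rest hs
    have hx : x = seq.getD k 0 := by
      have h0 : (seq.drop k)[0]? = seq[k]? := by
        rw [List.getElem?_drop]
        norm_num
      rw [← hs] at h0
      simp only [List.getElem?_cons_zero] at h0
      rw [List.getD_eq_getElem?_getD, ← h0]
      rfl
    have hrest : rest = seq.drop (k + 1) := by
      have := congrArg (List.drop 1) hs
      simp only [List.drop_one, List.tail_cons] at this
      rw [this, List.tail_drop]
    rw [PySem.List.enumerate_cons, List.foldl_cons, hx, stepB seq k,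
      show ((k : Int) + 1) = ((k + 1 : Nat) : Int) from by push_cast; ring]
    exact ih (k + 1) (by omega) hrest

theorem B_eq_spec (seq : List Int) :
    label_sequence_py_alt seq = (List.range seq.length).map (specLab seq) := by
  have h0 : stB seq 0 = (([] : List String), (none : Option Int), (0 : Int), (0 : Int), (0 : Int)) := by
    simp [stB, wF]
  have hfold := B_fold seq seq 0 (by omega) (by simp)
  rw [Nat.cast_zero, h0] at hfold
  show (List.foldl bodyB (([] : List String), (none : Option Int), (0 : Int), (0 : Int), (0 : Int)) (PySem.List.enumerate seq 0)).1 = _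
  rw [hfold, stB]

-- ===== VERDICT (by name: the statement is the Claim_ definition above) =====
theorem label_sequence_py_spec : Claim_equal_label_sequence_py := by
  intro seq _
  unfold Spec_label_sequence_py
  rw [A_eq_spec, B_eq_spec]
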